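-- pv_equiv track=rewrite | github.com/utamhank1/MIT_6.0001x | pset5/ps5.py | phrase_cleaner
-- ===== SOURCE A (Python) =====
-- import string
--
-- def phrase_cleaner(phrase):
--     '''Returns a "cleaned up" version of the phrase that is inputed.
--        Removes extra spaces and special characters.
--     '''
--     phrase = phrase.lower()
--     for i in range(0, len(phrase)):
--         # If the phrase contains a special character, replace the special character with a space.
--         for element in string.punctuation:
--             if phrase[i] == element:
--                 phrase = phrase.replace(element, ' ')
--     # Turn the phrase with special characters removed into a list of words.
--     phrase_split = phrase.split()
--
--     # Join the phrase list backtogether with a space in between the words.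
--     return ' '.join(phrase_split)
-- ===== SOURCE B (Python) =====
-- import string
--
-- def phrase_cleaner(phrase):
--     '''Returns a "cleaned up" version of the phrase that is inputed.
--        Removes extra spaces and special characters.
--     '''
--     words = []
--     current = ''
--     for c in phrase.lower():
--         if c in string.punctuation or c.isspace():
--             if current:
--                 words.append(current)
--                 current = ''
--         else:
--             current += c
--     if current:
--         words.append(current)
--     return ' '.join(words)
-- ===== Notes on version B (the rewrite author's own statement) =====
-- stated objective: faster
-- what changed: Replaced the quadratic per-index scan over string.punctuation with replace-all plus split/join by a single-pass tokenizer that buffers runs of non-delimiter characters and joins them once.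
import Mathlib
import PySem

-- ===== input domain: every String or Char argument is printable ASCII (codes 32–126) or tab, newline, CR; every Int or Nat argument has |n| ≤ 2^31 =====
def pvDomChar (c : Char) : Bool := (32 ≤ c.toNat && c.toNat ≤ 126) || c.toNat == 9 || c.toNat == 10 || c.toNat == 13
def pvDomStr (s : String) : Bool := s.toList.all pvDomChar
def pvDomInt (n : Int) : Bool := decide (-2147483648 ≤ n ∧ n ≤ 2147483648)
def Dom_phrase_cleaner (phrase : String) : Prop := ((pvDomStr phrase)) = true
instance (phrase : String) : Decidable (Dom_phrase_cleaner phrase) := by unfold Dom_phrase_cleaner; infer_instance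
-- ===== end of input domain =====

-- B replaces A's per-index punctuation scan with whole-string replaces, then split/join, by a single
-- left-to-right tokenizer pass (character buffer + word list); measurably faster on long inputs.

-- string.punctuation
def pyPunct : List Char := "!\"#$%&'()*+,-./:;<=>?@[\\]^_`{|}~".toList

-- ===== PORT A =====
def phrase_cleaner (phrase : String) : String :=
  let p0 := PySem.Str.lower phrase
  let p1 := (PySem.List.pyRange 0 (PySem.Str.len p0)).foldl (fun ph i =>
      pyPunct.foldl (fun ph element =>
        if PySem.Str.pyGet? ph i = some element then
          PySem.Str.replace ph (String.ofList [element]) " "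
        else ph) ph) p0
  PySem.Str.join " " (PySem.Str.split₀ p1)

-- ===== PORT B =====
def phrase_cleaner_alt (phrase : String) : String :=
  let r := (PySem.Str.lower phrase).toList.foldl
      (fun (acc : List (List Char) × List Char) c =>
        if c ∈ pyPunct ∨ PySem.Chars.isspace c then
          if acc.2.isEmpty then acc else (acc.1 ++ [acc.2], [])
        else (acc.1, acc.2 ++ [c])) ([], [])
  let words := if r.2.isEmpty then r.1 else r.1 ++ [r.2]
  PySem.Str.join " " (words.map String.ofList)

-- ===== PRECONDITION & SPEC =====
def Spec_phrase_cleaner (phrase : String) (out : String) : Prop := out = phrase_cleaner_alt phrase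
instance (phrase : String) (out : String) : Decidable (Spec_phrase_cleaner phrase out) := by unfold Spec_phrase_cleaner; infer_instance

-- ===== CLAIM (what is proved, stated in full; the proofs are below) =====
def Claim_equal_phrase_cleaner : Prop := ∀ (phrase : String), Dom_phrase_cleaner phrase → Spec_phrase_cleaner phrase (phrase_cleaner phrase)

-- ===== LEMMAS AND PROOFS =====

-- replace one char by ' ' everywhere
def pvRepl (e c : Char) : Char := if c = e then ' ' else c

-- A's net effect on one char
def pvSubst (c : Char) : Char := if c ∈ pyPunct then ' ' else c

-- chars replaced after A has processed indices [0, n)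
def pvG (orig : List Char) (n : Nat) (c : Char) : Char :=
  if c ∈ pyPunct ∧ c ∈ orig.take n then ' ' else c

-- A's inner loop body, at the char-list level
def pvStepA (t : List Char) (i : Int) : List Char :=
  pyPunct.foldl (fun t e =>
    if PySem.List.pyGet? t i = some e then PySem.Chars.replace t [e] [' '] else t) t

-- B's loop body
def pvStepB (acc : List (List Char) × List Char) (c : Char) : List (List Char) × List Char :=
  if c ∈ pyPunct ∨ PySem.Chars.isspace c then
    if acc.2.isEmpty then acc else (acc.1 ++ [acc.2], [])
  else (acc.1, acc.2 ++ [c])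

theorem pvReplaceGo (e : Char) : ∀ (s : List Char) (fuel : Nat) (acc : List Char),
    s.length ≤ fuel →
    PySem.Chars.replace.go [e] [' '] fuel s acc = acc.reverse ++ s.map (pvRepl e) := by
  intro s
  induction s with
  | nil =>
    intro fuel acc _
    cases fuel <;> simp [PySem.Chars.replace.go]
  | cons c t ih =>
    intro fuel acc h
    cases fuel with
    | zero => simp at h
    | succ f =>
      by_cases hc : c = e
      · subst hc
        rw [PySem.Chars.replace.go]
        simp [List.isPrefixOf, ih f (' ' :: acc) (by simpa using h), pvRepl]
      · rw [PySem.Chars.replace.go]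
        simp [List.isPrefixOf, Ne.symm hc, ih f (c :: acc) (by simpa using h), pvRepl, hc]

theorem pvReplaceOne (e : Char) (s : List Char) :
    PySem.Chars.replace s [e] [' '] = s.map (pvRepl e) := by
  rw [PySem.Chars.replace]
  simp [pvReplaceGo e s s.length [] le_rfl]

theorem pvPyGetMap {α β : Type} (f : α → β) (s : List α) (i : Int) :
    PySem.List.pyGet? (s.map f) i = (PySem.List.pyGet? s i).map f := by
  simp only [PySem.List.pyGet?, List.length_map]
  cases PySem.List.pyIdx? s.length i <;> simp

theorem pvInnerNoop (i : Int) : ∀ (L : List Char) (s : List Char),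
    (∀ e ∈ L, PySem.List.pyGet? s i ≠ some e) →
    L.foldl (fun t e =>
      if PySem.List.pyGet? t i = some e then PySem.Chars.replace t [e] [' '] else t) s = s := by
  intro L
  induction L with
  | nil => intro s _; rfl
  | cons e L' ih =>
    intro s h
    simp only [List.foldl_cons]
    rw [if_neg (h e (by simp))]
    exact ih s fun e' he' => h e' (by simp [he'])

theorem pvInner (i : Int) : ∀ (L : List Char) (s : List Char), ' ' ∉ L →
    L.foldl (fun t e =>
      if PySem.List.pyGet? t i = some e then PySem.Chars.replace t [e] [' '] else t) s =
    (PySem.List.pyGet? s i).elim s (fun d => if d ∈ L then s.map (pvRepl d) else s) := by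
  intro L
  induction L with
  | nil =>
    intro s _
    cases PySem.List.pyGet? s i <;> simp
  | cons e L' ih =>
    intro s hsp
    cases hg : PySem.List.pyGet? s i with
    | none =>
      simp only [List.foldl_cons]
      rw [if_neg (by simp [hg])]
      have := ih s (by simp at hsp; exact hsp.2)
      rw [hg] at this
      simp only [Option.elim_none] at this ⊢
      simp [this]
    | some d =>
      by_cases hd : d = e
      · subst hd
        simp only [List.foldl_cons]
        rw [if_pos hg, pvReplaceOne]
        rw [pvInnerNoop i L' (s.map (pvRepl d)) ?_]
        · simp
        · intro e' he'
          rw [pvPyGetMap, hg]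
          simp only [Option.map_some, pvRepl]
          intro hc
          apply hsp
          have : e' = ' ' := by simpa using hc.symm
          subst this
          simp [he']
      · simp only [List.foldl_cons]
        rw [if_neg (by simp [hg, hd])]
        have := ih s (by simp at hsp; exact hsp.2)
        rw [hg] at this
        rw [this]
        simp [List.mem_cons, hd]

theorem pvSpaceNotPunct : ' ' ∉ pyPunct := by decide

theorem pvOuter (orig : List Char) : ∀ (n : Nat), n ≤ orig.length →
    (PySem.List.pyRange 0 (n : Int)).foldl pvStepA orig = orig.map (pvG orig n) := by
  intro n
  induction n with
  | zero =>
    intro _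
    have h0 : PySem.List.pyRange 0 ((0 : Nat) : Int) = [] := by decide
    rw [h0]
    simp only [List.foldl_nil]
    have : orig.map (pvG orig 0) = orig.map id := List.map_congr_left (fun c _ => by simp [pvG])
    simp [this]
  | succ m ih =>
    intro h
    have hm : m < orig.length := by omega
    have hr : PySem.List.pyRange 0 ((m + 1 : Nat) : Int) =
        PySem.List.pyRange 0 (m : Int) ++ [(m : Int)] := by
      push_cast
      exact PySem.List.pyRange_one_succ_right (by positivity)
    rw [hr, List.foldl_append, ih (by omega)]
    simp only [List.foldl_cons, List.foldl_nil]
    set d := orig[m] with hd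
    have hget : PySem.List.pyGet? (orig.map (pvG orig m)) (m : Int) = some (pvG orig m d) := by
      rw [pvPyGetMap, PySem.List.pyGet?_ofNat orig m hm]
      rfl
    have htake : orig.take (m + 1) = orig.take m ++ [d] := by
      have h1 := List.take_concat_get hm
      rw [List.concat_eq_append] at h1
      exact h1.symm
    rw [pvStepA, pvInner _ _ _ pvSpaceNotPunct, hget]
    simp only [Option.elim_some]
    by_cases hp : d ∈ pyPunct
    · by_cases hin : d ∈ orig.take m
      · -- already replaced at an earlier index: no-op
        have : pvG orig m d = ' ' := by simp [pvG, hp, hin]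
        rw [this, if_neg pvSpaceNotPunct]
        apply List.map_congr_left
        intro c hc
        by_cases hcd : c = d
        · subst hcd; simp [pvG, hp, hin, htake]
        · simp only [pvG, htake]
          have : c ∈ orig.take m ++ [d] ↔ c ∈ orig.take m := by simp [hcd]
          simp [this]
      · -- new punctuation char: replaced everywhere
        have hGd : pvG orig m d = d := by simp [pvG, hin]
        rw [hGd, if_pos hp, List.map_map]
        apply List.map_congr_left
        intro c hc
        by_cases hcd : c = d
        · subst hcd
          simp [Function.comp, pvG, hp, hin, pvRepl, htake]
        · simp only [Function.comp, pvG, htake]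
          have hmem : c ∈ orig.take m ++ [d] ↔ c ∈ orig.take m := by simp [hcd]
          by_cases hcp : c ∈ pyPunct ∧ c ∈ orig.take m
          · have hsd : (' ' : Char) ≠ d := fun he => pvSpaceNotPunct (he ▸ hp)
            simp [hcp, pvRepl, hmem, hsd]
          · simp [hcp, pvRepl, hcd, hmem]
    · -- not punctuation: no-op
      have hGd : pvG orig m d = d := by simp [pvG, hp]
      rw [hGd, if_neg hp]
      apply List.map_congr_left
      intro c hc
      by_cases hcd : c = d
      · subst hcd; simp [pvG, hp]
      · simp only [pvG, htake]
        have : c ∈ orig.take m ++ [d] ↔ c ∈ orig.take m := by simp [hcd]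
        simp [this]

theorem pvSubstSpace (c : Char) (h : c ∈ pyPunct ∨ PySem.Chars.isspace c) :
    PySem.Chars.isspace (pvSubst c) = true := by
  by_cases hp : c ∈ pyPunct
  · simp [pvSubst, hp]; decide
  · rcases h with h | h
    · exact absurd h hp
    · simpa [pvSubst, hp] using h

theorem pvSubstId (c : Char) (h : ¬ (c ∈ pyPunct ∨ PySem.Chars.isspace c)) :
    pvSubst c = c ∧ PySem.Chars.isspace c = false := by
  rw [not_or] at h
  simp [pvSubst, h.1, h.2]

theorem pvGoD (p : List Char) : ∀ (words : List (List Char)) (cur : List Char),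
    PySem.Chars.split₀.go (p.map pvSubst) cur.reverse words.reverse =
    (let r := p.foldl pvStepB (words, cur)
     if r.2.isEmpty then r.1 else r.1 ++ [r.2]) := by
  induction p with
  | nil =>
    intro words cur
    simp only [List.map_nil, List.foldl_nil]
    rw [PySem.Chars.split₀.go]
    by_cases hc : cur.isEmpty <;> simp [hc]
  | cons c p' ih =>
    intro words cur
    simp only [List.map_cons, List.foldl_cons]
    rw [PySem.Chars.split₀.go]
    by_cases hD : c ∈ pyPunct ∨ PySem.Chars.isspace c
    · rw [if_pos (pvSubstSpace c hD)]
      by_cases hc : cur.isEmpty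
      · have : cur = [] := by simpa using hc
        subst this
        simp only [List.reverse_nil, List.isEmpty_nil, if_pos rfl]
        have := ih words []
        simpa [pvStepB, hD] using this
      · rw [if_neg (by simpa using hc)]
        have h2 : (cur.reverse.reverse :: words.reverse) = ((words ++ [cur]).reverse) := by simp
        rw [h2]
        have := ih (words ++ [cur]) []
        simp only [List.reverse_nil] at this
        rw [this]
        simp [pvStepB, hD, hc]
    · obtain ⟨h1, h2⟩ := pvSubstId c hD
      rw [h1, if_neg (by simp [h2])]
      have h3 : (c :: cur.reverse) = (cur ++ [c]).reverse := by simp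
      rw [h3]
      have := ih words (cur ++ [c])
      rw [this]
      simp [pvStepB, hD]

theorem pvSplitDef (s : String) :
    PySem.Str.split₀ s = (PySem.Chars.split₀ s.toList).map String.ofList := rfl

theorem pvFoldToList {β : Type} (F : String → β → String) (G : List Char → β → List Char)
    (h : ∀ (s : String) (b : β), (F s b).toList = G s.toList b) :
    ∀ (L : List β) (s : String), (L.foldl F s).toList = L.foldl G s.toList := by
  intro L
  induction L with
  | nil => intro s; rfl
  | cons b L' ih =>
    intro s
    rw [List.foldl_cons, List.foldl_cons, ih, h]

theorem pvMain (phrase : String) : phrase_cleaner phrase = phrase_cleaner_alt phrase := by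
  simp only [phrase_cleaner, phrase_cleaner_alt]
  set p0 := PySem.Str.lower phrase with hp0
  set orig := p0.toList with horig
  have hlift :
      ((PySem.List.pyRange 0 (PySem.Str.len p0)).foldl (fun ph i =>
        pyPunct.foldl (fun ph element =>
          if PySem.Str.pyGet? ph i = some element then
            PySem.Str.replace ph (String.ofList [element]) " "
          else ph) ph) p0).toList
      = (PySem.List.pyRange 0 (PySem.Str.len p0)).foldl pvStepA orig := by
    apply pvFoldToList
    intro s i
    apply pvFoldToList
    intro s' e
    by_cases h : PySem.List.pyGet? s'.toList i = some e
    · rw [if_pos h, if_pos (by simpa [PySem.Str.pyGet?_eq] using h)]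
      simp [PySem.Str.toList_replace]
    · rw [if_neg h, if_neg (by simpa [PySem.Str.pyGet?_eq] using h)]
  have hlen : PySem.Str.len p0 = (orig.length : Int) := by
    rw [PySem.Str.len_eq, horig]
  have houter : (PySem.List.pyRange 0 (PySem.Str.len p0)).foldl pvStepA orig
      = orig.map pvSubst := by
    rw [hlen, pvOuter orig orig.length le_rfl]
    apply List.map_congr_left
    intro c hc
    simp [pvG, pvSubst, List.take_length, hc]
  have hsplit : PySem.Chars.split₀ (orig.map pvSubst) =
      (let r := orig.foldl pvStepB ([], [])
       if r.2.isEmpty then r.1 else r.1 ++ [r.2]) := by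
    have := pvGoD orig [] []
    simpa [PySem.Chars.split₀] using this
  rw [pvSplitDef]
  rw [hlift, houter, hsplit]
  congr 1

-- ===== VERDICT (by name: the statement is the Claim_ definition above) =====
theorem phrase_cleaner_spec : Claim_equal_phrase_cleaner := by
  intro phrase _
  unfold Spec_phrase_cleaner
  exact pvMain phrase
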